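-- pv_equiv track=rewrite | github.com/TimFanelle/CS_honors_project | Deprecated/Tests/Mapping_and_Routing/testing_3Axis_mapping.py | rangess
-- ===== SOURCE A (Python) =====
-- def rangess(uu):
--     rminx = uu[0][0]
--     rmaxx = uu[0][0]
--     rminy = uu[0][1]
--     rmaxy = uu[0][1]
--     rminz = uu[0][2]
--     rmaxz = uu[0][2]
--     for yy in uu:
--         if yy[0] < rminx:
--             rminx = yy[0]
--         elif yy[0] > rmaxx:
--             rmaxx = yy[0]
--         if yy[1] < rminy:
--             rminy = yy[1]
--         elif yy[1] > rmaxy: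
--             rmaxy = yy[1]
--         if yy[2] < rminz:
--             rminz = yy[2]
--         elif yy[2] > rmaxz:
--             rmaxz = yy[2]
--     rx = rmaxx-rminx
--     ry = rmaxy-rminy
--     rz = rmaxz-rminz
--     return rx, ry, rz
-- ===== SOURCE B (Python) =====
-- def rangess(uu):
--     cols = list(zip(*uu))
--     return (max(cols[0]) - min(cols[0]),
--             max(cols[1]) - min(cols[1]),
--             max(cols[2]) - min(cols[2]))
-- ===== Notes on version B (the rewrite author's own statement) =====
-- stated objective: simpler
-- what changed: Replaced the fused manual min/max tracking loop with a transpose (zip(*uu)) followed by built-in min/max per column; no faster, but far shorter and plainer.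
import Mathlib
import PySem

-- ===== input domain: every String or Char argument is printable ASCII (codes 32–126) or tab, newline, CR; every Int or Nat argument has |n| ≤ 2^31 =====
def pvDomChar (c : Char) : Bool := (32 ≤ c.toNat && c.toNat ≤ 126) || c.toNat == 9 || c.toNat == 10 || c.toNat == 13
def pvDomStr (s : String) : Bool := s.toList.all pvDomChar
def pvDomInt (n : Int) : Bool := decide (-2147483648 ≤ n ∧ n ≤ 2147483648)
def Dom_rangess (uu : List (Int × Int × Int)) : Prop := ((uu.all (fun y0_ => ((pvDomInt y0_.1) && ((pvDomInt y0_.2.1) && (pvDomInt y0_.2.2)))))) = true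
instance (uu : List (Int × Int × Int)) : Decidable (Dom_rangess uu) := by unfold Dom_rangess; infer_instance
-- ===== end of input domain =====

-- B replaces A's fused manual min/max tracking loop by a transpose plus built-in min/max per
-- column (same cost, shorter and plainer); equivalence is proved for nonempty input (A raises
-- IndexError on [], and so does B).

-- ===== PORT A =====
-- the loop body of A, on the 6-tuple state (rminx, rmaxx, rminy, rmaxy, rminz, rmaxz)
def rangessStep (s : Int × Int × Int × Int × Int × Int) (yy : Int × Int × Int) :
    Int × Int × Int × Int × Int × Int :=
  let (rminx, rmaxx, rminy, rmaxy, rminz, rmaxz) := s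
  let (rminx, rmaxx) :=
    if yy.1 < rminx then (yy.1, rmaxx)
    else if yy.1 > rmaxx then (rminx, yy.1) else (rminx, rmaxx)
  let (rminy, rmaxy) :=
    if yy.2.1 < rminy then (yy.2.1, rmaxy)
    else if yy.2.1 > rmaxy then (rminy, yy.2.1) else (rminy, rmaxy)
  let (rminz, rmaxz) :=
    if yy.2.2 < rminz then (yy.2.2, rmaxz)
    else if yy.2.2 > rmaxz then (rminz, yy.2.2) else (rminz, rmaxz)
  (rminx, rmaxx, rminy, rmaxy, rminz, rmaxz)

def rangess (uu : List (Int × Int × Int)) : Int × Int × Int :=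
  match uu with
  | [] => (0, 0, 0)   -- unreachable: Python raises IndexError here, excluded by Pre_rangess
  | h :: _ =>
    let s := uu.foldl rangessStep (h.1, h.1, h.2.1, h.2.1, h.2.2, h.2.2)
    (s.2.1 - s.1, s.2.2.2.1 - s.2.2.1, s.2.2.2.2.2 - s.2.2.2.2.1)

-- ===== PORT B =====
-- span of one column: max(col) - min(col) via PySem min?/max? (none = raise on empty, excluded by Pre_)
def colSpan (col : List Int) : Int :=
  ((PySem.List.max? col (fun y => y)).getD 0) - ((PySem.List.min? col (fun y => y)).getD 0)

def rangess_alt (uu : List (Int × Int × Int)) : Int × Int × Int :=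
  let c0 := uu.map (fun y => y.1)
  let c1 := uu.map (fun y => y.2.1)
  let c2 := uu.map (fun y => y.2.2)
  (colSpan c0, colSpan c1, colSpan c2)

-- ===== PRECONDITION & SPEC =====
-- Pre_: both Pythons raise IndexError on the empty list
def Pre_rangess (uu : List (Int × Int × Int)) : Prop := uu ≠ []
instance (uu : List (Int × Int × Int)) : Decidable (Pre_rangess uu) := by unfold Pre_rangess; infer_instance
def pvWitness_rangess : (List (Int × Int × Int)) := [(1, 2, 3), (-4, 0, 7)]

def Spec_rangess (uu : List (Int × Int × Int)) (out : Int × Int × Int) : Prop := out = rangess_alt uu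
instance (uu : List (Int × Int × Int)) (out : Int × Int × Int) : Decidable (Spec_rangess uu out) := by unfold Spec_rangess; infer_instance

-- ===== CLAIM (what is proved, stated in full; the proofs are below) =====
def Claim_equal_rangess : Prop := ∀ (uu : List (Int × Int × Int)), Dom_rangess uu → Pre_rangess uu → Spec_rangess uu (rangess uu)

-- ===== LEMMAS AND PROOFS =====

-- one elif-branch of A's body computes (min, max) of the running pair with the new value,
-- provided the running pair is ordered
lemma step_axis (mn mx y : Int) (h : mn ≤ mx) :
    (if y < mn then (y, mx) else if y > mx then (mn, y) else (mn, mx)) = (min mn y, max mx y) := by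
  split_ifs <;> simp_all <;> omega

lemma step_eq (mnx mxx mny mxy mnz mxz : Int) (yy : Int × Int × Int)
    (h1 : mnx ≤ mxx) (h2 : mny ≤ mxy) (h3 : mnz ≤ mxz) :
    rangessStep (mnx, mxx, mny, mxy, mnz, mxz) yy =
      (min mnx yy.1, max mxx yy.1, min mny yy.2.1, max mxy yy.2.1,
       min mnz yy.2.2, max mxz yy.2.2) := by
  simp only [rangessStep, step_axis _ _ _ h1, step_axis _ _ _ h2, step_axis _ _ _ h3]

-- A's loop, started from ordered pairs, is three independent running-min/running-max folds
lemma loop_eq (t : List (Int × Int × Int)) :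
    ∀ (mnx mxx mny mxy mnz mxz : Int), mnx ≤ mxx → mny ≤ mxy → mnz ≤ mxz →
    t.foldl rangessStep (mnx, mxx, mny, mxy, mnz, mxz) =
      (t.foldl (fun a y => min a y.1) mnx, t.foldl (fun a y => max a y.1) mxx,
       t.foldl (fun a y => min a y.2.1) mny, t.foldl (fun a y => max a y.2.1) mxy,
       t.foldl (fun a y => min a y.2.2) mnz, t.foldl (fun a y => max a y.2.2) mxz) := by
  induction t with
  | nil => intro _ _ _ _ _ _ _ _ _; rfl
  | cons yy t ih =>
    intro mnx mxx mny mxy mnz mxz h1 h2 h3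
    simp only [List.foldl_cons, step_eq _ _ _ _ _ _ _ h1 h2 h3]
    exact ih _ _ _ _ _ _ (le_trans (min_le_left _ _) (le_trans h1 (le_max_left _ _)))
      (le_trans (min_le_left _ _) (le_trans h2 (le_max_left _ _)))
      (le_trans (min_le_left _ _) (le_trans h3 (le_max_left _ _)))

lemma foldl_min_fst (t : List (Int × Int × Int)) (a : Int) (f : Int × Int × Int → Int) :
    t.foldl (fun a y => min a (f y)) a = (t.map f).foldl min a := by
  simp [List.foldl_map]

lemma foldl_max_fst (t : List (Int × Int × Int)) (a : Int) (f : Int × Int × Int → Int) :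
    t.foldl (fun a y => max a (f y)) a = (t.map f).foldl max a := by
  simp [List.foldl_map]

lemma colSpan_cons (x : Int) (t : List Int) :
    colSpan (x :: t) = t.foldl max x - t.foldl min x := by
  simp [colSpan, PySem.List.max?_id_cons, PySem.List.min?_id_cons]

-- ===== VERDICT (by name: the statement is the Claim_ definition above) =====
theorem rangess_spec : Claim_equal_rangess := by
  intro uu _ hpre
  match uu with
  | [] => exact absurd rfl hpre
  | h :: t =>
    show rangess (h :: t) = rangess_alt (h :: t)
    simp only [rangess, List.foldl_cons]
    rw [step_eq _ _ _ _ _ _ _ le_rfl le_rfl le_rfl]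
    simp only [min_self, max_self]
    rw [loop_eq t _ _ _ _ _ _ le_rfl le_rfl le_rfl]
    simp only [rangess_alt, List.map_cons, colSpan_cons,
      foldl_min_fst, foldl_max_fst]
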